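-- pv_equiv track=rewrite | github.com/lockephi/Allentown-L104-Node | l104_quantum_data_analyzer/feature_extraction.py | _embed_pair_basis
-- ===== SOURCE A (Python) =====
-- def _embed_pair_basis(b1: int, b2: int, env: int, n_qubits: int,
--                       q1: int, q2: int) -> int:
--     """Embed qubit pair values + environment into full basis index."""
--     result = 0
--     env_pos = 0
--     for q in range(n_qubits):
--         if q == q1:
--             result |= (b1 << q)
--         elif q == q2:
--             result |= (b2 << q)
--         else:
--             result |= (((env >> env_pos) & 1) << q)
--             env_pos += 1
--     return result
-- ===== SOURCE B (Python) =====
-- def _embed_pair_basis(b1: int, b2: int, env: int, n_qubits: int,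
--                       q1: int, q2: int) -> int:
--     """Embed qubit pair values + environment into full basis index.
--
--     A constant number of big-int operations instead of a per-qubit loop:
--     collect the value assigned to each register position, mask env to the
--     number of remaining environment slots, open a zero slot at each
--     assigned position (lowest first), then OR the assigned values in.
--     """
--     vals = {q: b for q, b in ((q1, b1), (q2, b2)) if 0 <= q < n_qubits}
--     e = env & ((1 << (max(n_qubits, 0) - len(vals))) - 1)
--     for p in sorted(vals):
--         e = ((e >> p) << (p + 1)) | (e & ((1 << p) - 1))
--     for p, b in vals.items():
--         e |= b << p
--     return e
-- ===== Notes on version B (the rewrite author's own statement) =====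
-- stated objective: faster
-- what changed: Replaces the per-qubit loop with a constant number of whole-number bit operations (collect the in-range position-to-value assignments in a dict, mask env to the number of remaining environment slots, splice a zero slot at each assigned position, OR the values in); Pre_ excludes only duplicate in-range qubit indices (q1 = q2), where which of b1/b2 lands on the shared position is accidental: A's first elif branch keeps b1, B's dict comprehension keeps b2.
-- outside the precondition, e.g. on _embed_pair_basis(1, 0, 0, 2, 1, 1): A returns 2, B returns 0
import Mathlib
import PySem

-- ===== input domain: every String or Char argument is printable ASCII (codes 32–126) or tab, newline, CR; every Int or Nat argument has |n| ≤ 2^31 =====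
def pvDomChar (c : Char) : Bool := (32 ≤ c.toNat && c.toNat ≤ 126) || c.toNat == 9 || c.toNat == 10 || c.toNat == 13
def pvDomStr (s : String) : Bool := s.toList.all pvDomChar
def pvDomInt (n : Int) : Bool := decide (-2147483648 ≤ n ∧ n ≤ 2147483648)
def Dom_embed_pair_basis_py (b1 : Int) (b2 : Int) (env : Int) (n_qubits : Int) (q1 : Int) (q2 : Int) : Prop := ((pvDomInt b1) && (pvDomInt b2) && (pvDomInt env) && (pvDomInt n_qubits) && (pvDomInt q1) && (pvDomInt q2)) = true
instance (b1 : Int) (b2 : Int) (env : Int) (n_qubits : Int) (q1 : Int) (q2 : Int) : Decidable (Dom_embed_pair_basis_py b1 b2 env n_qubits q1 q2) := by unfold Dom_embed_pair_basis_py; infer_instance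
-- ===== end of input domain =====

-- B replaces A's per-qubit loop by a constant number of big-int bit operations (collect the
-- in-range position→value assignments, mask env, splice a zero slot per assigned position,
-- OR the values in); proved equal on Pre_ (q1 ≠ q2).

-- ===== PORT A =====
-- Loop body of A's 'for q in range(n_qubits)'; state st = (result, env_pos).
-- q and env_pos are always ≥ 0 where they are used as shift amounts, so .toNat is exact there.
def pvStepA (b1 : Int) (b2 : Int) (env : Int) (q1 : Int) (q2 : Int)
    (st : Int × Int) (q : Int) : Int × Int :=
  if q = q1 then (Int.lor st.1 (b1 <<< q.toNat), st.2)
  else if q = q2 then (Int.lor st.1 (b2 <<< q.toNat), st.2)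
  else (Int.lor st.1 ((Int.land (env >>> st.2.toNat) 1) <<< q.toNat), st.2 + 1)

def embed_pair_basis_py (b1 : Int) (b2 : Int) (env : Int) (n_qubits : Int) (q1 : Int) (q2 : Int) : Int :=
  ((PySem.List.pyRange 0 n_qubits 1).foldl (pvStepA b1 b2 env q1 q2) (0, 0)).1

-- ===== PORT B =====
-- B's loop body '((e >> p) << (p + 1)) | (e & ((1 << p) - 1))'; p ≥ 0 here, so .toNat is exact.
def pvInsertZeroSlot (e : Int) (p : Nat) : Int :=
  Int.lor ((e >>> p) <<< (p + 1)) (Int.land e ((1 : Int) <<< p - 1))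

def embed_pair_basis_py_alt (b1 : Int) (b2 : Int) (env : Int) (n_qubits : Int) (q1 : Int) (q2 : Int) : Int :=
  -- the dict comprehension, as a fold of inserts over the filtered pairs; sorted(vals)
  -- iterates the sorted key list, vals.items() the (position, value) pairs in order
  let vals : PySem.Dict Int Int :=
    (([(q1, b1), (q2, b2)] : List (Int × Int)).filter
      (fun qb => decide (0 ≤ qb.1 ∧ qb.1 < n_qubits))).foldl
      (fun d qb => d.insert qb.1 qb.2) PySem.Dict.empty
  let e := Int.land env ((1 : Int) <<< (max n_qubits 0 - (vals.size : Int)).toNat - 1)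
  let e := (PySem.List.sorted vals.keys (fun x => x) false).foldl
    (fun e p => pvInsertZeroSlot e p.toNat) e
  vals.items.foldl (fun e qb => Int.lor e (qb.2 <<< qb.1.toNat)) e

-- ===== PRECONDITION & SPEC =====
-- Pre_ excludes only duplicate in-range qubit indices (q1 = q2 inside [0, n_qubits)), where
-- which of b1/b2 lands on the shared position is accidental: A's first elif branch keeps b1,
-- B's dict comprehension keeps b2.
def Pre_embed_pair_basis_py (b1 : Int) (b2 : Int) (env : Int) (n_qubits : Int) (q1 : Int) (q2 : Int) : Prop :=
  ¬ (q1 = q2 ∧ 0 ≤ q1 ∧ q1 < n_qubits)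
instance (b1 : Int) (b2 : Int) (env : Int) (n_qubits : Int) (q1 : Int) (q2 : Int) : Decidable (Pre_embed_pair_basis_py b1 b2 env n_qubits q1 q2) := by unfold Pre_embed_pair_basis_py; infer_instance

def pvWitness_embed_pair_basis_py : Int × Int × Int × Int × Int × Int := (1, 0, 5, 4, 1, 3)

def Spec_embed_pair_basis_py (b1 : Int) (b2 : Int) (env : Int) (n_qubits : Int) (q1 : Int) (q2 : Int) (out : Int) : Prop := out = embed_pair_basis_py_alt b1 b2 env n_qubits q1 q2
instance (b1 : Int) (b2 : Int) (env : Int) (n_qubits : Int) (q1 : Int) (q2 : Int) (out : Int) : Decidable (Spec_embed_pair_basis_py b1 b2 env n_qubits q1 q2 out) := by unfold Spec_embed_pair_basis_py; infer_instance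

-- ===== CLAIM (what is proved, stated in full; the proofs are below) =====
def Claim_equal_embed_pair_basis_py : Prop := ∀ (b1 : Int) (b2 : Int) (env : Int) (n_qubits : Int) (q1 : Int) (q2 : Int), Dom_embed_pair_basis_py b1 b2 env n_qubits q1 q2 → Pre_embed_pair_basis_py b1 b2 env n_qubits q1 q2 → Spec_embed_pair_basis_py b1 b2 env n_qubits q1 q2 (embed_pair_basis_py b1 b2 env n_qubits q1 q2)

-- ===== LEMMAS AND PROOFS =====

theorem pv_tb_shiftRight (a : Int) (k j : Nat) :
    (a >>> k).testBit j = a.testBit (k + j) := by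
  cases a with
  | ofNat n =>
    show (Int.ofNat (n >>> k)).testBit j = (Int.ofNat n).testBit (k + j)
    simp [Int.testBit, Nat.testBit_shiftRight]
  | negSucc n =>
    show (Int.negSucc (n >>> k)).testBit j = (Int.negSucc n).testBit (k + j)
    simp [Int.testBit, Nat.testBit_shiftRight]
theorem pv_nat_pred_shift (n k j : Nat) :
    ((n + 1) <<< k - 1).testBit j = (!(decide (k ≤ j) && !(n.testBit (j - k)))) := by
  have h1 : (1 : Nat) ≤ 2 ^ k := Nat.one_le_two_pow
  have h2 : (n + 1) <<< k - 1 = 2 ^ k * n + (2 ^ k - 1) := by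
    rw [Nat.shiftLeft_eq, Nat.add_mul, one_mul, Nat.mul_comm, Nat.add_sub_assoc h1]
  rw [h2, Nat.testBit_two_pow_mul_add n (by omega) j, Nat.testBit_two_pow_sub_one]
  by_cases h : j < k <;> simp [h] <;> omega
theorem pv_tb_shiftLeft (a : Int) (k j : Nat) :
    (a <<< k).testBit j = (decide (k ≤ j) && a.testBit (j - k)) := by
  cases a with
  | ofNat n =>
    show (Int.ofNat (n <<< k)).testBit j = _
    simp [Int.testBit, Nat.testBit_shiftLeft, ge_iff_le]
  | negSucc n =>
    show (Int.negSucc ((n + 1) <<< k - 1)).testBit j = _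
    simp [Int.testBit, pv_nat_pred_shift]
theorem pv_tb_mask (k j : Nat) :
    ((1 : Int) <<< k - 1).testBit j = decide (j < k) := by
  have h1 : (1 : Nat) ≤ 2 ^ k := Nat.one_le_two_pow
  have h2 : ((1 : Int) <<< k - 1) = Int.ofNat (2 ^ k - 1) := by
    show Int.ofNat (1 <<< k) - 1 = _
    rw [Nat.shiftLeft_eq, one_mul]
    simp [Int.ofNat_sub h1]
  rw [h2]
  show (2 ^ k - 1 : Nat).testBit j = _
  rw [Nat.testBit_two_pow_sub_one]
theorem pv_tb_one (j : Nat) : (1 : Int).testBit j = decide (j = 0) := by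
  show (1 : Nat).testBit j = _
  have : (1 : Nat) = 2 ^ 0 := rfl
  rw [this, Nat.testBit_two_pow]
  simp [eq_comm]
theorem pv_tb_lor (a b : Int) (j : Nat) :
    (Int.lor a b).testBit j = (a.testBit j || b.testBit j) := Int.testBit_lor a b j

theorem pv_tb_land (a b : Int) (j : Nat) :
    (Int.land a b).testBit j = (a.testBit j && b.testBit j) := Int.testBit_land a b j

theorem pv_int_ext {a b : Int} (h : ∀ j, a.testBit j = b.testBit j) : a = b := by
  cases a with
  | ofNat m =>
    cases b with
    | ofNat n =>
      have : m = n := Nat.eq_of_testBit_eq fun i => by simpa [Int.testBit] using h i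
      simp [this]
    | negSucc n =>
      exfalso
      have hi := h (m + n + 1)
      have hm : m.testBit (m + n + 1) = false :=
        Nat.testBit_lt_two_pow (lt_of_le_of_lt (Nat.le_add_right m (n+1)) Nat.lt_two_pow_self)
      have hn : n.testBit (m + n + 1) = false :=
        Nat.testBit_lt_two_pow (lt_of_le_of_lt (by omega) (Nat.lt_two_pow_self (n := m + n + 1)))
      simp [Int.testBit, hm, hn] at hi
  | negSucc m =>
    cases b with
    | ofNat n =>
      exfalso
      have hi := h (m + n + 1)
      have hm : m.testBit (m + n + 1) = false :=
        Nat.testBit_lt_two_pow (lt_of_le_of_lt (by omega) (Nat.lt_two_pow_self (n := m + n + 1)))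
      have hn : n.testBit (m + n + 1) = false :=
        Nat.testBit_lt_two_pow (lt_of_le_of_lt (by omega) (Nat.lt_two_pow_self (n := m + n + 1)))
      simp [Int.testBit, hm, hn] at hi
    | negSucc n =>
      have : m = n := Nat.eq_of_testBit_eq fun i => by
        have := h i; simpa [Int.testBit] using this
      simp [this]

theorem pv_tb_ins (e : Int) (p j : Nat) :
    (pvInsertZeroSlot e p).testBit j
      = ((decide (j < p) && e.testBit j) || (decide (p < j) && e.testBit (j - 1))) := by
  unfold pvInsertZeroSlot
  rw [Int.testBit_lor, Int.testBit_land, pv_tb_shiftLeft, pv_tb_mask]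
  rw [pv_tb_shiftRight]
  by_cases h1 : j < p
  · have h2 : ¬ (p < j) := by omega
    simp [h1, h2, Bool.and_comm]
  · by_cases h2 : p < j
    · have hj : p + (j - (p + 1)) = j - 1 := by omega
      have h3 : p + 1 ≤ j := by omega
      rw [hj]
      simp [h1, h2, h3]
    · have h3 : ¬ (p + 1 ≤ j) := by omega
      simp [h1, h2, h3]

def pvCnt (q1 q2 : Int) (m : Nat) : Nat :=
  (if 0 ≤ q1 ∧ q1 < (m : Int) then 1 else 0) +
  (if (0 ≤ q2 ∧ q2 < (m : Int)) ∧ q2 ≠ q1 then 1 else 0)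

def pvAbit (b1 b2 env q1 q2 : Int) (m : Nat) (j : Nat) : Bool :=
  (decide (0 ≤ q1 ∧ q1 < (m : Int)) && (b1 <<< q1.toNat).testBit j)
  || (decide ((0 ≤ q2 ∧ q2 < (m : Int)) ∧ q2 ≠ q1) && (b2 <<< q2.toNat).testBit j)
  || (decide ((j : Int) < (m : Int) ∧ (j : Int) ≠ q1 ∧ (j : Int) ≠ q2)
        && env.testBit (j - pvCnt q1 q2 j))

theorem pv_cnt_le (q1 q2 : Int) (m : Nat) : pvCnt q1 q2 m ≤ m := by
  unfold pvCnt; split_ifs with h1 h2 h2 <;> omega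

theorem pv_cnt_succ_q1 (q1 q2 : Int) (m : Nat) (h : (m : Int) = q1) :
    pvCnt q1 q2 (m + 1) = pvCnt q1 q2 m + 1 := by
  unfold pvCnt; push_cast; split_ifs <;> omega

theorem pv_cnt_succ_q2 (q1 q2 : Int) (m : Nat) (h1 : (m : Int) ≠ q1) (h2 : (m : Int) = q2) :
    pvCnt q1 q2 (m + 1) = pvCnt q1 q2 m + 1 := by
  unfold pvCnt; push_cast; split_ifs <;> omega

theorem pv_cnt_succ_env (q1 q2 : Int) (m : Nat) (h1 : (m : Int) ≠ q1) (h2 : (m : Int) ≠ q2) :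
    pvCnt q1 q2 (m + 1) = pvCnt q1 q2 m := by
  unfold pvCnt; push_cast; split_ifs <;> omega

theorem pv_abit_succ_q1 (b1 b2 env q1 q2 : Int) (m : Nat) (h : (m : Int) = q1) (j : Nat) :
    pvAbit b1 b2 env q1 q2 (m + 1) j
      = (pvAbit b1 b2 env q1 q2 m j || (b1 <<< q1.toNat).testBit j) := by
  unfold pvAbit
  have e1 : decide (0 ≤ q1 ∧ q1 < ((m + 1 : Nat) : Int)) = true := by
    simp only [decide_eq_true_eq]; push_cast; omega
  have e2 : decide ((0 ≤ q2 ∧ q2 < ((m + 1 : Nat) : Int)) ∧ q2 ≠ q1)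
      = decide ((0 ≤ q2 ∧ q2 < (m : Int)) ∧ q2 ≠ q1) :=
    decide_eq_decide.mpr (by push_cast; omega)
  have e3 : decide ((j : Int) < ((m + 1 : Nat) : Int) ∧ (j : Int) ≠ q1 ∧ (j : Int) ≠ q2)
      = decide ((j : Int) < (m : Int) ∧ (j : Int) ≠ q1 ∧ (j : Int) ≠ q2) :=
    decide_eq_decide.mpr (by push_cast; omega)
  rw [e1, e2, e3]
  cases htb : (b1 <<< q1.toNat).testBit j <;> simp

theorem pv_abit_succ_q2 (b1 b2 env q1 q2 : Int) (m : Nat) (h1 : (m : Int) ≠ q1) (h2 : (m : Int) = q2) (j : Nat) :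
    pvAbit b1 b2 env q1 q2 (m + 1) j
      = (pvAbit b1 b2 env q1 q2 m j || (b2 <<< q2.toNat).testBit j) := by
  unfold pvAbit
  have e1 : decide (0 ≤ q1 ∧ q1 < ((m + 1 : Nat) : Int)) = decide (0 ≤ q1 ∧ q1 < (m : Int)) :=
    decide_eq_decide.mpr (by push_cast; omega)
  have e2 : decide ((0 ≤ q2 ∧ q2 < ((m + 1 : Nat) : Int)) ∧ q2 ≠ q1) = true := by
    simp only [decide_eq_true_eq]; push_cast; omega
  have e3 : decide ((j : Int) < ((m + 1 : Nat) : Int) ∧ (j : Int) ≠ q1 ∧ (j : Int) ≠ q2)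
      = decide ((j : Int) < (m : Int) ∧ (j : Int) ≠ q1 ∧ (j : Int) ≠ q2) :=
    decide_eq_decide.mpr (by push_cast; omega)
  rw [e1, e2, e3]
  cases htb : (b2 <<< q2.toNat).testBit j <;> simp [Bool.or_assoc, Bool.or_comm, Bool.or_left_comm]

theorem pv_abit_succ_env (b1 b2 env q1 q2 : Int) (m : Nat) (h1 : (m : Int) ≠ q1) (h2 : (m : Int) ≠ q2) (j : Nat) :
    pvAbit b1 b2 env q1 q2 (m + 1) j
      = (pvAbit b1 b2 env q1 q2 m j
          || (decide (j = m) && env.testBit (m - pvCnt q1 q2 m))) := by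
  unfold pvAbit
  have e1 : decide (0 ≤ q1 ∧ q1 < ((m + 1 : Nat) : Int)) = decide (0 ≤ q1 ∧ q1 < (m : Int)) :=
    decide_eq_decide.mpr (by push_cast; omega)
  have e2 : decide ((0 ≤ q2 ∧ q2 < ((m + 1 : Nat) : Int)) ∧ q2 ≠ q1)
      = decide ((0 ≤ q2 ∧ q2 < (m : Int)) ∧ q2 ≠ q1) :=
    decide_eq_decide.mpr (by push_cast; omega)
  rw [e1, e2]
  by_cases hj : j = m
  · subst hj
    have e3 : decide ((j : Int) < ((j + 1 : Nat) : Int) ∧ (j : Int) ≠ q1 ∧ (j : Int) ≠ q2) = true := by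
      simp only [decide_eq_true_eq]; push_cast; omega
    have e4 : decide ((j : Int) < (j : Int) ∧ (j : Int) ≠ q1 ∧ (j : Int) ≠ q2) = false := by
      simp only [decide_eq_false_iff_not]; push_cast; omega
    rw [e3, e4]
    simp [Bool.or_comm]
  · have e3 : decide ((j : Int) < ((m + 1 : Nat) : Int) ∧ (j : Int) ≠ q1 ∧ (j : Int) ≠ q2)
        = decide ((j : Int) < (m : Int) ∧ (j : Int) ≠ q1 ∧ (j : Int) ≠ q2) :=
      decide_eq_decide.mpr (by push_cast; constructor <;> intro hx <;> exact ⟨by omega, hx.2⟩)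
    rw [e3]
    simp [hj]

theorem pv_stepA_eq_q1 (b1 b2 env q1 q2 : Int) (st : Int × Int) (q : Int) (h : q = q1) :
    pvStepA b1 b2 env q1 q2 st q = (Int.lor st.1 (b1 <<< q.toNat), st.2) := by
  simp [pvStepA, h]

theorem pv_stepA_eq_q2 (b1 b2 env q1 q2 : Int) (st : Int × Int) (q : Int) (h1 : q ≠ q1) (h2 : q = q2) :
    pvStepA b1 b2 env q1 q2 st q = (Int.lor st.1 (b2 <<< q.toNat), st.2) := by
  simp only [pvStepA]
  rw [if_neg h1, if_pos h2]

theorem pv_stepA_eq_env (b1 b2 env q1 q2 : Int) (st : Int × Int) (q : Int) (h1 : q ≠ q1) (h2 : q ≠ q2) :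
    pvStepA b1 b2 env q1 q2 st q
      = (Int.lor st.1 ((Int.land (env >>> st.2.toNat) 1) <<< q.toNat), st.2 + 1) := by
  simp [pvStepA, h1, h2]

theorem pv_loopA (b1 b2 env q1 q2 : Int) (m : Nat) :
    ((PySem.List.pyRange 0 (m : Int) 1).foldl (pvStepA b1 b2 env q1 q2) (0, 0)).2
        = (m : Int) - (pvCnt q1 q2 m : Int)
    ∧ ∀ j, ((PySem.List.pyRange 0 (m : Int) 1).foldl (pvStepA b1 b2 env q1 q2) (0, 0)).1.testBit j
        = pvAbit b1 b2 env q1 q2 m j := by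
  induction m with
  | zero =>
    rw [PySem.List.pyRange_one_eq_nil (by norm_num)]
    constructor
    · simp only [List.foldl_nil]
      unfold pvCnt
      split_ifs <;> simp <;> omega
    · intro j
      unfold pvAbit
      have e1 : decide (0 ≤ q1 ∧ q1 < ((0 : Nat) : Int)) = false := by
        simp only [decide_eq_false_iff_not]; omega
      have e2 : decide ((0 ≤ q2 ∧ q2 < ((0 : Nat) : Int)) ∧ q2 ≠ q1) = false := by
        simp only [decide_eq_false_iff_not]; push_cast; omega
      have e3 : decide ((j : Int) < ((0 : Nat) : Int) ∧ (j : Int) ≠ q1 ∧ (j : Int) ≠ q2) = false := by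
        simp only [decide_eq_false_iff_not]; push_cast; omega
      rw [e1, e2, e3]
      simp [Int.testBit]
  | succ m ih =>
    obtain ⟨ih2, ih1⟩ := ih
    have hcast : ((m + 1 : Nat) : Int) = (m : Int) + 1 := by push_cast; ring
    rw [hcast, PySem.List.pyRange_one_succ_right (by positivity), List.foldl_append,
      List.foldl_cons, List.foldl_nil]
    have htn : ((m : Int)).toNat = m := Int.toNat_natCast m
    by_cases hq1 : (m : Int) = q1
    · rw [pv_stepA_eq_q1 b1 b2 env q1 q2 _ _ hq1]
      refine ⟨?_, ?_⟩
      · simp only [ih2, pv_cnt_succ_q1 q1 q2 m hq1]; push_cast; ring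
      · intro j
        have ht1 : q1.toNat = m := by rw [← hq1, htn]
        rw [Int.testBit_lor, ih1 j, pv_abit_succ_q1 b1 b2 env q1 q2 m hq1 j, htn, ht1]
    · by_cases hq2 : (m : Int) = q2
      · rw [pv_stepA_eq_q2 b1 b2 env q1 q2 _ _ hq1 hq2]
        refine ⟨?_, ?_⟩
        · simp only [ih2, pv_cnt_succ_q2 q1 q2 m hq1 hq2]; push_cast; ring
        · intro j
          have ht2 : q2.toNat = m := by rw [← hq2, htn]
          rw [Int.testBit_lor, ih1 j, pv_abit_succ_q2 b1 b2 env q1 q2 m hq1 hq2 j, htn, ht2]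
      · rw [pv_stepA_eq_env b1 b2 env q1 q2 _ _ hq1 hq2]
        have hle : pvCnt q1 q2 m ≤ m := pv_cnt_le q1 q2 m
        have hst2 : (((PySem.List.pyRange 0 (m : Int) 1).foldl (pvStepA b1 b2 env q1 q2) (0, 0)).2).toNat
            = m - pvCnt q1 q2 m := by
          rw [ih2]; omega
        refine ⟨?_, ?_⟩
        · simp only [ih2, pv_cnt_succ_env q1 q2 m hq1 hq2]; push_cast; ring
        · intro j
          rw [Int.testBit_lor, ih1 j, pv_abit_succ_env b1 b2 env q1 q2 m hq1 hq2 j, htn, hst2]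
          congr 1
          rw [pv_tb_shiftLeft, pv_tb_land, pv_tb_one]
          by_cases hj : j = m
          · subst hj
            simp [pv_tb_shiftRight]
          · by_cases hj2 : m ≤ j
            · have : ¬ (j - m = 0) := by omega
              simp [hj, hj2, this]
            · simp [hj, hj2]

theorem pv_env_zero (env : Int) (k j : Nat) :
    (Int.land env ((1 : Int) <<< k - 1)).testBit j = (decide (j < k) && env.testBit j) := by
  rw [pv_tb_land, pv_tb_mask, Bool.and_comm]

theorem pv_env_one (env : Int) (k p j : Nat) :
    (pvInsertZeroSlot (Int.land env ((1 : Int) <<< k - 1)) p).testBit j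
      = (if j < p then (decide (j < k) && env.testBit j)
         else if j = p then false
         else (decide (j - 1 < k) && env.testBit (j - 1))) := by
  rw [pv_tb_ins, pv_env_zero, pv_env_zero]
  by_cases h1 : j < p
  · have h2 : ¬ (p < j) := by omega
    simp [h1, h2]
  · by_cases h2 : j = p
    · have h3 : ¬ (p < j) := by omega
      simp [h1, h2, h3]
    · have h3 : p < j := by omega
      simp [h1, h2, h3]

theorem pv_env_two (env : Int) (k l h j : Nat) (hlh : l < h) :
    (pvInsertZeroSlot (pvInsertZeroSlot (Int.land env ((1 : Int) <<< k - 1)) l) h).testBit j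
      = (if j < l then (decide (j < k) && env.testBit j)
         else if j = l then false
         else if j < h then (decide (j - 1 < k) && env.testBit (j - 1))
         else if j = h then false
         else (decide (j - 2 < k) && env.testBit (j - 2))) := by
  rw [pv_tb_ins, pv_env_one, pv_env_one]
  by_cases c1 : j < l
  · have d1 : j < h := by omega
    have d2 : ¬ h < j := by omega
    simp [c1, d1, d2]
  · by_cases c2 : j = l
    · subst c2
      have d2 : ¬ h < j := by omega
      have d3 : ¬ j < j := by omega
      simp [hlh, d2, d3]
    · by_cases c3 : j < h
      · have d2 : ¬ h < j := by omega
        simp [c1, c2, c3, d2]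
      · by_cases c4 : j = h
        · subst c4
          have d3 : ¬ j < j := by omega
          simp [c1, c2, d3]
        · have h2 : h < j := by omega
          have e1 : ¬ (j - 1 < l) := by omega
          have e2 : ¬ (j - 1 = l) := by omega
          have e3 : j - 1 - 1 = j - 2 := by omega
          simp [c1, c2, c3, c4, h2, e1, e2, e3]

theorem pv_te_two (env q1 q2 : Int) (N l h : Nat)
    (hq1 : (l : Int) = q1) (hq2 : (h : Int) = q2) (hlh : l < h) (hhN : h < N) (j : Nat) :
    (if j < l then (decide (j < N - 2) && env.testBit j)
     else if j = l then false
     else if j < h then (decide (j - 1 < N - 2) && env.testBit (j - 1))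
     else if j = h then false
     else (decide (j - 2 < N - 2) && env.testBit (j - 2)))
    = (decide ((j : Int) < (N : Int) ∧ (j : Int) ≠ q1 ∧ (j : Int) ≠ q2)
        && env.testBit (j - pvCnt q1 q2 j)) := by
  have hcnt : pvCnt q1 q2 j
      = (if l < j then 1 else 0) + (if h < j then 1 else 0) := by
    unfold pvCnt; split_ifs <;> omega
  rw [hcnt]
  by_cases c1 : j < l
  · have d1 : decide ((j : Int) < (N : Int) ∧ (j : Int) ≠ q1 ∧ (j : Int) ≠ q2) = true := by
      simp only [decide_eq_true_eq]; omega
    have d2 : decide (j < N - 2) = true := by simp only [decide_eq_true_eq]; omega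
    have d3 : j - (0 + 0) = j := by omega
    simp only [if_pos c1, d1, d2, if_neg (by omega : ¬ l < j), if_neg (by omega : ¬ h < j), d3,
      Bool.true_and]
  · by_cases c2 : j = l
    · have d1 : decide ((j : Int) < (N : Int) ∧ (j : Int) ≠ q1 ∧ (j : Int) ≠ q2) = false := by
        simp only [decide_eq_false_iff_not]; omega
      rw [if_neg c1, if_pos c2, d1, Bool.false_and]
    · by_cases c3 : j < h
      · have d1 : decide ((j : Int) < (N : Int) ∧ (j : Int) ≠ q1 ∧ (j : Int) ≠ q2) = true := by
          simp only [decide_eq_true_eq]; omega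
        have d2 : decide (j - 1 < N - 2) = true := by simp only [decide_eq_true_eq]; omega
        have d3 : j - (1 + 0) = j - 1 := by omega
        simp only [if_neg c1, if_neg c2, if_pos c3, d1, d2, if_pos (by omega : l < j),
          if_neg (by omega : ¬ h < j), d3, Bool.true_and]
      · by_cases c4 : j = h
        · have d1 : decide ((j : Int) < (N : Int) ∧ (j : Int) ≠ q1 ∧ (j : Int) ≠ q2) = false := by
            simp only [decide_eq_false_iff_not]; omega
          rw [if_neg c1, if_neg c2, if_neg c3, if_pos c4, d1, Bool.false_and]
        · have d1 : decide ((j : Int) < (N : Int) ∧ (j : Int) ≠ q1 ∧ (j : Int) ≠ q2)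
              = decide (j - 2 < N - 2) := by
            apply decide_eq_decide.mpr; omega
          have d3 : j - (1 + 1) = j - 2 := by omega
          rw [if_neg c1, if_neg c2, if_neg c3, if_neg c4, ← d1,
            if_pos (by omega : l < j), if_pos (by omega : h < j), d3]


theorem pv_te_one (env q1 q2 : Int) (N p : Nat) (hpN : p < N)
    (hiff : ∀ i : Nat, i < N → (((i : Int) ≠ q1 ∧ (i : Int) ≠ q2) ↔ i ≠ p))
    (hcnt : ∀ i : Nat, i ≤ N → pvCnt q1 q2 i = if p < i then 1 else 0) (j : Nat) :
    (if j < p then (decide (j < N - 1) && env.testBit j)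
     else if j = p then false
     else (decide (j - 1 < N - 1) && env.testBit (j - 1)))
    = (decide ((j : Int) < (N : Int) ∧ (j : Int) ≠ q1 ∧ (j : Int) ≠ q2)
        && env.testBit (j - pvCnt q1 q2 j)) := by
  by_cases c1 : j < p
  · have d1 : decide ((j : Int) < (N : Int) ∧ (j : Int) ≠ q1 ∧ (j : Int) ≠ q2) = true := by
      simp only [decide_eq_true_eq]
      refine ⟨by omega, (hiff j (by omega)).mpr (by omega)⟩
    have d2 : decide (j < N - 1) = true := by simp only [decide_eq_true_eq]; omega
    have d3 : j - (if p < j then 1 else 0) = j := by rw [if_neg (by omega : ¬ p < j)]; omega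
    rw [hcnt j (by omega)]
    simp only [if_pos c1, d1, d2, d3, Bool.true_and]
  · by_cases c2 : j = p
    · have d1 : decide ((j : Int) < (N : Int) ∧ (j : Int) ≠ q1 ∧ (j : Int) ≠ q2) = false := by
        simp only [decide_eq_false_iff_not]
        intro hx
        exact ((hiff j (by omega)).mp ⟨hx.2.1, hx.2.2⟩) c2
      rw [hcnt j (by omega), if_neg c1, if_pos c2, d1, Bool.false_and]
    · by_cases c3 : j < N
      · have d1 : decide ((j : Int) < (N : Int) ∧ (j : Int) ≠ q1 ∧ (j : Int) ≠ q2) = true := by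
          simp only [decide_eq_true_eq]
          refine ⟨by omega, (hiff j c3).mpr c2⟩
        have d2 : decide (j - 1 < N - 1) = true := by simp only [decide_eq_true_eq]; omega
        have d3 : j - (if p < j then 1 else 0) = j - 1 := by
          rw [if_pos (by omega : p < j)]
        rw [hcnt j (by omega)]
        simp only [if_neg c1, if_neg c2, d1, d2, d3, Bool.true_and]
      · have d1 : decide ((j : Int) < (N : Int) ∧ (j : Int) ≠ q1 ∧ (j : Int) ≠ q2) = false := by
          simp only [decide_eq_false_iff_not]; omega
        have d2 : decide (j - 1 < N - 1) = false := by simp only [decide_eq_false_iff_not]; omega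
        rw [if_neg c1, if_neg c2, d1, d2, Bool.false_and, Bool.false_and]

theorem pv_te_zero (env q1 q2 : Int) (N : Nat)
    (hiff : ∀ i : Nat, i < N → ((i : Int) ≠ q1 ∧ (i : Int) ≠ q2))
    (hcnt : ∀ i : Nat, i ≤ N → pvCnt q1 q2 i = 0) (j : Nat) :
    (decide (j < N) && env.testBit j)
    = (decide ((j : Int) < (N : Int) ∧ (j : Int) ≠ q1 ∧ (j : Int) ≠ q2)
        && env.testBit (j - pvCnt q1 q2 j)) := by
  by_cases hj : j < N
  · rw [hcnt j (by omega), Nat.sub_zero]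
    congr 1
    apply decide_eq_decide.mpr
    constructor
    · intro hx
      exact ⟨by omega, (hiff j hx).1, (hiff j hx).2⟩
    · intro hx; omega
  · have d1 : decide (j < N) = false := by simp only [decide_eq_false_iff_not]; omega
    have d2 : decide ((j : Int) < (N : Int) ∧ (j : Int) ≠ q1 ∧ (j : Int) ≠ q2) = false := by
      simp only [decide_eq_false_iff_not]; omega
    rw [d1, d2, Bool.false_and, Bool.false_and]

theorem pv_main (b1 b2 env n_qubits q1 q2 : Int)
    (hp : ¬ (q1 = q2 ∧ 0 ≤ q1 ∧ q1 < n_qubits)) :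
    embed_pair_basis_py b1 b2 env n_qubits q1 q2
      = embed_pair_basis_py_alt b1 b2 env n_qubits q1 q2 := by
  unfold embed_pair_basis_py embed_pair_basis_py_alt
  set N := n_qubits.toNat with hNdef
  have hr : PySem.List.pyRange 0 n_qubits 1 = PySem.List.pyRange 0 ((N : Int)) 1 := by
    by_cases hn : 0 ≤ n_qubits
    · rw [hNdef, Int.toNat_of_nonneg hn]
    · rw [PySem.List.pyRange_one_eq_nil (by omega),
        PySem.List.pyRange_one_eq_nil (by simp [hNdef]; omega)]
  rw [hr]
  apply pv_int_ext
  intro j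
  rw [(pv_loopA b1 b2 env q1 q2 N).2 j]
  by_cases h1 : 0 ≤ q1 ∧ q1 < n_qubits
  · by_cases h2 : 0 ≤ q2 ∧ q2 < n_qubits
    · -- both positions assigned
      have hne : q1 ≠ q2 := by omega
      have hvals : (([(q1, b1), (q2, b2)] : List (Int × Int)).filter
          (fun qb => decide (0 ≤ qb.1 ∧ qb.1 < n_qubits))) = [(q1, b1), (q2, b2)] := by
        simp [List.filter, h1, h2]
      have hitems : ((([(q1, b1), (q2, b2)] : List (Int × Int)).filter
          (fun qb => decide (0 ≤ qb.1 ∧ qb.1 < n_qubits))).foldl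
          (fun d qb => d.insert qb.1 qb.2) (PySem.Dict.empty : PySem.Dict Int Int)).items
          = [(q1, b1), (q2, b2)] := by
        rw [hvals]
        have h := PySem.Dict.items_foldl_insert_fresh ([(q1, b1), (q2, b2)] : List (Int × Int))
          Prod.fst Prod.snd (PySem.Dict.empty : PySem.Dict Int Int)
          (by intro a _; simp) (by simp [hne])
        simpa using h
      have hA1 : decide (0 ≤ q1 ∧ q1 < (N : Int)) = true := by
        simp only [decide_eq_true_eq]; omega
      have hA2 : decide ((0 ≤ q2 ∧ q2 < (N : Int)) ∧ q2 ≠ q1) = true := by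
        simp only [decide_eq_true_eq]
        exact ⟨by omega, fun h => hne h.symm⟩
      have hmask : (max n_qubits 0 - ((([(q1, b1), (q2, b2)] : List (Int × Int)).length : Nat) : Int)).toNat = N - 2 := by
        simp only [List.length_cons, List.length_nil]; omega
      simp only [PySem.Dict.keys, PySem.Dict.size, hitems, hmask,
        List.map_cons, List.map_nil, List.foldl_cons, List.foldl_nil]
      have hql : ((q1.toNat : Int)) = q1 := Int.toNat_of_nonneg h1.1
      have hqh : ((q2.toNat : Int)) = q2 := Int.toNat_of_nonneg h2.1
      by_cases hq : q1 < q2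
      · have hsort : PySem.List.sorted ([q1, q2] : List Int) (fun x => x) false = [q1, q2] :=
          PySem.List.sorted_eq_of_perm_of_pairwise_lt _ _ _ (List.Perm.refl _) (by simp [hq])
        rw [hsort]
        simp only [List.foldl_cons, List.foldl_nil]
        rw [pv_tb_lor, pv_tb_lor,
          pv_env_two env (N - 2) q1.toNat q2.toNat j (by omega),
          pv_te_two env q1 q2 N q1.toNat q2.toNat hql hqh (by omega) (by omega) j]
        unfold pvAbit
        rw [hA1, hA2, Bool.true_and, Bool.true_and]
        cases (b1 <<< q1.toNat).testBit j <;> cases (b2 <<< q2.toNat).testBit j <;> simp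
      · have hlt : q2 < q1 := by omega
        have hsort : PySem.List.sorted ([q1, q2] : List Int) (fun x => x) false = [q2, q1] :=
          PySem.List.sorted_eq_of_perm_of_pairwise_lt _ _ _ (List.Perm.swap q1 q2 []) (by simp [hlt])
        rw [hsort]
        simp only [List.foldl_cons, List.foldl_nil]
        rw [pv_tb_lor, pv_tb_lor,
          pv_env_two env (N - 2) q2.toNat q1.toNat j (by omega),
          pv_te_two env q2 q1 N q2.toNat q1.toNat hqh hql (by omega) (by omega) j]
        unfold pvAbit
        rw [hA1, hA2, Bool.true_and, Bool.true_and]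
        have hsw : decide ((j : Int) < (N : Int) ∧ (j : Int) ≠ q2 ∧ (j : Int) ≠ q1)
            = decide ((j : Int) < (N : Int) ∧ (j : Int) ≠ q1 ∧ (j : Int) ≠ q2) :=
          decide_eq_decide.mpr (by omega)
        have hsc : pvCnt q2 q1 j = pvCnt q1 q2 j := by
          unfold pvCnt; split_ifs <;> omega
        rw [hsw, hsc]
        cases (b1 <<< q1.toNat).testBit j <;> cases (b2 <<< q2.toNat).testBit j <;> simp
    · -- only q1 assigned
      have hvals : (([(q1, b1), (q2, b2)] : List (Int × Int)).filter
          (fun qb => decide (0 ≤ qb.1 ∧ qb.1 < n_qubits))) = [(q1, b1)] := by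
        simp [List.filter, h1, h2]
      have hitems : ((([(q1, b1), (q2, b2)] : List (Int × Int)).filter
          (fun qb => decide (0 ≤ qb.1 ∧ qb.1 < n_qubits))).foldl
          (fun d qb => d.insert qb.1 qb.2) (PySem.Dict.empty : PySem.Dict Int Int)).items
          = [(q1, b1)] := by
        rw [hvals]
        have h := PySem.Dict.items_foldl_insert_fresh ([(q1, b1)] : List (Int × Int))
          Prod.fst Prod.snd (PySem.Dict.empty : PySem.Dict Int Int)
          (by intro a _; simp) (by simp)
        simpa using h
      have hA1 : decide (0 ≤ q1 ∧ q1 < (N : Int)) = true := by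
        simp only [decide_eq_true_eq]; omega
      have hA2 : decide ((0 ≤ q2 ∧ q2 < (N : Int)) ∧ q2 ≠ q1) = false := by
        simp only [decide_eq_false_iff_not]; omega
      have hmask : (max n_qubits 0 - ((([(q1, b1)] : List (Int × Int)).length : Nat) : Int)).toNat = N - 1 := by
        simp only [List.length_cons, List.length_nil]; omega
      have hsort : PySem.List.sorted ([q1] : List Int) (fun x => x) false = [q1] :=
        PySem.List.sorted_eq_of_perm_of_pairwise_lt _ _ _ (List.Perm.refl _) (by simp)
      simp only [PySem.Dict.keys, PySem.Dict.size, hitems, hmask,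
        List.map_cons, List.map_nil, hsort, List.foldl_cons, List.foldl_nil]
      have hiff1 : ∀ i : Nat, i < N → (((i : Int) ≠ q1 ∧ (i : Int) ≠ q2) ↔ i ≠ q1.toNat) := by
        intro i hi; omega
      have hcnt1 : ∀ i : Nat, i ≤ N → pvCnt q1 q2 i = if q1.toNat < i then 1 else 0 := by
        intro i hi; unfold pvCnt; split_ifs <;> omega
      rw [pv_tb_lor, pv_env_one env (N - 1) q1.toNat j,
        pv_te_one env q1 q2 N q1.toNat (by omega) hiff1 hcnt1 j]
      unfold pvAbit
      rw [hA1, hA2, Bool.true_and, Bool.false_and]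
      cases (b1 <<< q1.toNat).testBit j <;> simp
  · by_cases h2 : 0 ≤ q2 ∧ q2 < n_qubits
    · -- only q2 assigned
      have hvals : (([(q1, b1), (q2, b2)] : List (Int × Int)).filter
          (fun qb => decide (0 ≤ qb.1 ∧ qb.1 < n_qubits))) = [(q2, b2)] := by
        simp [List.filter, h1, h2]
      have hitems : ((([(q1, b1), (q2, b2)] : List (Int × Int)).filter
          (fun qb => decide (0 ≤ qb.1 ∧ qb.1 < n_qubits))).foldl
          (fun d qb => d.insert qb.1 qb.2) (PySem.Dict.empty : PySem.Dict Int Int)).items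
          = [(q2, b2)] := by
        rw [hvals]
        have h := PySem.Dict.items_foldl_insert_fresh ([(q2, b2)] : List (Int × Int))
          Prod.fst Prod.snd (PySem.Dict.empty : PySem.Dict Int Int)
          (by intro a _; simp) (by simp)
        simpa using h
      have hA1 : decide (0 ≤ q1 ∧ q1 < (N : Int)) = false := by
        simp only [decide_eq_false_iff_not]; omega
      have hA2 : decide ((0 ≤ q2 ∧ q2 < (N : Int)) ∧ q2 ≠ q1) = true := by
        simp only [decide_eq_true_eq]
        refine ⟨by omega, ?_⟩
        intro h; omega
      have hmask : (max n_qubits 0 - ((([(q2, b2)] : List (Int × Int)).length : Nat) : Int)).toNat = N - 1 := by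
        simp only [List.length_cons, List.length_nil]; omega
      have hsort : PySem.List.sorted ([q2] : List Int) (fun x => x) false = [q2] :=
        PySem.List.sorted_eq_of_perm_of_pairwise_lt _ _ _ (List.Perm.refl _) (by simp)
      simp only [PySem.Dict.keys, PySem.Dict.size, hitems, hmask,
        List.map_cons, List.map_nil, hsort, List.foldl_cons, List.foldl_nil]
      have hiff2 : ∀ i : Nat, i < N → (((i : Int) ≠ q1 ∧ (i : Int) ≠ q2) ↔ i ≠ q2.toNat) := by
        intro i hi; omega
      have hcnt2 : ∀ i : Nat, i ≤ N → pvCnt q1 q2 i = if q2.toNat < i then 1 else 0 := by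
        intro i hi; unfold pvCnt; split_ifs <;> omega
      rw [pv_tb_lor, pv_env_one env (N - 1) q2.toNat j,
        pv_te_one env q1 q2 N q2.toNat (by omega) hiff2 hcnt2 j]
      unfold pvAbit
      rw [hA1, hA2, Bool.false_and, Bool.true_and]
      cases (b2 <<< q2.toNat).testBit j <;> simp
    · -- no position assigned
      have hvals : (([(q1, b1), (q2, b2)] : List (Int × Int)).filter
          (fun qb => decide (0 ≤ qb.1 ∧ qb.1 < n_qubits))) = [] := by
        simp [List.filter, h1, h2]
      have hitems : ((([(q1, b1), (q2, b2)] : List (Int × Int)).filter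
          (fun qb => decide (0 ≤ qb.1 ∧ qb.1 < n_qubits))).foldl
          (fun d qb => d.insert qb.1 qb.2) (PySem.Dict.empty : PySem.Dict Int Int)).items
          = [] := by
        rw [hvals]
        rfl
      have hA1 : decide (0 ≤ q1 ∧ q1 < (N : Int)) = false := by
        simp only [decide_eq_false_iff_not]; omega
      have hA2 : decide ((0 ≤ q2 ∧ q2 < (N : Int)) ∧ q2 ≠ q1) = false := by
        simp only [decide_eq_false_iff_not]; omega
      have hmask : (max n_qubits 0 - ((([] : List (Int × Int)).length : Nat) : Int)).toNat = N := by
        simp only [List.length_nil]; omega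
      have hsort : PySem.List.sorted ([] : List Int) (fun x => x) false = [] :=
        PySem.List.sorted_eq_of_perm_of_pairwise_lt _ _ _ (List.Perm.refl _) (by simp)
      simp only [PySem.Dict.keys, PySem.Dict.size, hitems, hmask,
        List.map_nil, hsort, List.foldl_nil]
      have hiff0 : ∀ i : Nat, i < N → ((i : Int) ≠ q1 ∧ (i : Int) ≠ q2) := by
        intro i hi; omega
      have hcnt0 : ∀ i : Nat, i ≤ N → pvCnt q1 q2 i = 0 := by
        intro i hi; unfold pvCnt; split_ifs <;> omega
      rw [pv_env_zero env N j, pv_te_zero env q1 q2 N hiff0 hcnt0 j]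
      unfold pvAbit
      rw [hA1, hA2, Bool.false_and, Bool.false_and]
      simp

-- ===== VERDICT (by name: the statement is the Claim_ definition above) =====
theorem embed_pair_basis_py_spec : Claim_equal_embed_pair_basis_py := by
  intro b1 b2 env n_qubits q1 q2 _ hp
  exact pv_main b1 b2 env n_qubits q1 q2 hp
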